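-- pv_equiv track=rewrite | github.com/Jon-Al/Flet-Application-Tracker | core/doc_manager.py | _find_run_indices
-- ===== SOURCE A (Python) =====
-- def _find_run_indices(run_texts, start, end):
--     """Find the run indices and offsets that cover the placeholder."""
--     current_pos = 0
--     run_start_idx = run_end_idx = None
--     offset_start = offset_end = 0
--     for i, text in enumerate(run_texts):
--         run_length = len(text)
--         run_end_pos = current_pos + run_length
--         if run_start_idx is None and start < run_end_pos:
--             run_start_idx = i
--             offset_start = start - current_pos
--         if run_end_idx is None and end <= run_end_pos:
--             run_end_idx = i
--             offset_end = end - current_pos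
--             break
--         current_pos += run_length
--     if run_start_idx is not None and run_end_idx is not None:
--         return run_start_idx, run_end_idx, offset_start, offset_end
--     else:
--         return None, None, None, None
-- ===== SOURCE B (Python) =====
-- def _first_true(a, pred):
--     """Binary search: smallest index i with pred(a[i]) true, assuming pred is
--     monotone along a (false... then true...); len(a) if none."""
--     lo, hi = 0, len(a)
--     while lo < hi:
--         mid = (lo + hi) // 2
--         if pred(a[mid]):
--             hi = mid
--         else:
--             lo = mid + 1
--     return lo
--
--
-- def _find_run_indices(run_texts, start, end):
--     """Find the run indices and offsets that cover the placeholder."""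
--     ends = []
--     total = 0
--     for text in run_texts:
--         total += len(text)
--         ends.append(total)
--     i = _first_true(ends, lambda v: start < v)   # bisect_right(ends, start)
--     j = _first_true(ends, lambda v: end <= v)    # bisect_left(ends, end)
--     if j < len(ends) and i <= j:
--         return (i, j,
--                 start - (ends[i] - len(run_texts[i])),
--                 end - (ends[j] - len(run_texts[j])))
--     return None, None, None, None
-- ===== Notes on version B (the rewrite author's own statement) =====
-- stated objective: alternative
-- what changed: Replaces A's single fused scan (cumulative position plus mutable option state and an early break) by a prefix array of cumulative run ends queried with two hand-rolled binary searches (bisect_right for the start index, bisect_left for the end index), followed by one closed-form range/order check and offset arithmetic.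
import Mathlib
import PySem

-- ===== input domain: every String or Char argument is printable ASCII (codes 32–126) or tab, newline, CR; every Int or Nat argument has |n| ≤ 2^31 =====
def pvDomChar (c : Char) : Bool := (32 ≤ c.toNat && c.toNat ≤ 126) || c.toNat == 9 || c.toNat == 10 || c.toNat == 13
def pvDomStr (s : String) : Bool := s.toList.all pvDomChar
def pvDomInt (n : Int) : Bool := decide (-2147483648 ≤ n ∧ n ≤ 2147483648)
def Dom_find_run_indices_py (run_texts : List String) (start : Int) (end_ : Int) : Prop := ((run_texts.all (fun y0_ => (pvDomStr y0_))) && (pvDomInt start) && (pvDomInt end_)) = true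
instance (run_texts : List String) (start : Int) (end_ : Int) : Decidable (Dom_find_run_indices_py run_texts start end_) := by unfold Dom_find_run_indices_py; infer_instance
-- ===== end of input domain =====

-- B replaces A's fused scan-with-break by a prefix array of cumulative run ends
-- plus two hand-rolled binary searches and closed-form offset arithmetic (objective: alternative).

-- ===== PORT A =====
-- loop state: i, current_pos, and (run_start_idx, offset_start) bundled as an Option
-- (A's offset_start is only ever returned after run_start_idx is set, so the bundling is exact).
def findLoopA (s e : Int) : List String → Int → Int → Option (Int × Int) → (Option Int × Option Int × Option Int × Option Int)
  | [], _, _, _ => (none, none, none, none)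
  | t :: rest, i, pos, rs =>
    let rep := pos + PySem.Str.len t
    let rs' := match rs with
      | none => if s < rep then some (i, s - pos) else none
      | some x => some x
    if e ≤ rep then
      match rs' with
      | some (k, os) => (some k, some i, some os, some (e - pos))
      | none => (none, none, none, none)
    else findLoopA s e rest (i + 1) rep rs'

def find_run_indices_py (run_texts : List String) (start : Int) (end_ : Int) : Option Int × Option Int × Option Int × Option Int :=
  findLoopA start end_ run_texts 0 0 none

-- ===== PORT B =====
-- port of Source B's _first_true: binary search, while-loop as fuel recursion (fuel ≥ hi - lo suffices)
def firstTrueGo (a : List Int) (p : Int → Bool) : Nat → Nat → Nat → Nat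
  | lo, _, 0 => lo
  | lo, hi, fuel + 1 =>
    if lo < hi then
      let mid := (lo + hi) / 2
      if p (a.getD mid 0) then firstTrueGo a p lo mid fuel
      else firstTrueGo a p (mid + 1) hi fuel
    else lo

def firstTrue (a : List Int) (p : Int → Bool) : Nat := firstTrueGo a p 0 a.length a.length

def find_run_indices_py_alt (run_texts : List String) (start : Int) (end_ : Int) : Option Int × Option Int × Option Int × Option Int :=
  let acc := run_texts.foldl (fun (a : Int × List Int) text => (a.1 + PySem.Str.len text, a.2 ++ [a.1 + PySem.Str.len text])) (0, [])
  let ends := acc.2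
  let i := firstTrue ends (fun v => decide (start < v))
  let j := firstTrue ends (fun v => decide (end_ ≤ v))
  if j < ends.length ∧ i ≤ j then
    (some (i : Int), some (j : Int),
     some (start - (ends.getD i 0 - PySem.Str.len (run_texts.getD i ""))),
     some (end_ - (ends.getD j 0 - PySem.Str.len (run_texts.getD j ""))))
  else (none, none, none, none)

-- ===== PRECONDITION & SPEC =====
def Spec_find_run_indices_py (run_texts : List String) (start : Int) (end_ : Int) (out : Option Int × Option Int × Option Int × Option Int) : Prop := out = find_run_indices_py_alt run_texts start end_
instance (run_texts : List String) (start : Int) (end_ : Int) (out : Option Int × Option Int × Option Int × Option Int) : Decidable (Spec_find_run_indices_py run_texts start end_ out) := by unfold Spec_find_run_indices_py; infer_instance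

-- ===== CLAIM (what is proved, stated in full; the proofs are below) =====
def Claim_equal_find_run_indices_py : Prop := ∀ (run_texts : List String) (start : Int) (end_ : Int), Dom_find_run_indices_py run_texts start end_ → Spec_find_run_indices_py run_texts start end_ (find_run_indices_py run_texts start end_)

-- ===== LEMMAS AND PROOFS =====

-- cumulative ends of the runs, starting from position pos
def endsOf (pos : Int) : List String → List Int
  | [] => []
  | t :: r => (pos + PySem.Str.len t) :: endsOf (pos + PySem.Str.len t) r

-- index of the first element satisfying p (length of the list if none)
def ffirst (p : Int → Bool) : List Int → Nat
  | [] => 0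
  | x :: r => if p x then 0 else ffirst p r + 1

theorem length_endsOf (ts : List String) : ∀ pos, (endsOf pos ts).length = ts.length := by
  induction ts with
  | nil => intro pos; rfl
  | cons t r ih => intro pos; simp [endsOf, ih]

theorem foldl_ends (ts : List String) : ∀ (pos : Int) (acc : List Int),
    (ts.foldl (fun (a : Int × List Int) text => (a.1 + PySem.Str.len text, a.2 ++ [a.1 + PySem.Str.len text])) (pos, acc)).2
      = acc ++ endsOf pos ts := by
  induction ts with
  | nil => intro pos acc; simp [endsOf]
  | cons t r ih =>
    intro pos acc
    rw [List.foldl_cons, endsOf]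
    show (List.foldl _ (pos + PySem.Str.len t, acc ++ [pos + PySem.Str.len t]) r).2 = _
    rw [ih]
    simp

theorem endsOf_lb (ts : List String) : ∀ (pos : Int) (k : Nat), k < ts.length →
    pos ≤ (endsOf pos ts).getD k 0 := by
  induction ts with
  | nil => intro pos k h; simp at h
  | cons t r ih =>
    intro pos k h
    have hl : (0 : Int) ≤ PySem.Str.len t := by simp [PySem.Str.len_eq]
    cases k with
    | zero => rw [endsOf, List.getD_cons_zero]; omega
    | succ k' =>
      rw [endsOf, List.getD_cons_succ]
      have := ih (pos + PySem.Str.len t) k' (by simpa using h)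
      omega

theorem endsOf_mono (ts : List String) : ∀ (pos : Int) (j k : Nat), j ≤ k → k < ts.length →
    (endsOf pos ts).getD j 0 ≤ (endsOf pos ts).getD k 0 := by
  induction ts with
  | nil => intro pos j k _ h; simp at h
  | cons t r ih =>
    intro pos j k hjk hk
    cases k with
    | zero =>
      interval_cases j
      exact le_refl _
    | succ k' =>
      cases j with
      | zero =>
        rw [endsOf, List.getD_cons_zero, List.getD_cons_succ]
        have hl : (0 : Int) ≤ PySem.Str.len t := by simp [PySem.Str.len_eq]
        have := endsOf_lb r (pos + PySem.Str.len t) k' (by simpa using hk)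
        omega
      | succ j' =>
        rw [endsOf, List.getD_cons_succ, List.getD_cons_succ]
        exact ih (pos + PySem.Str.len t) j' k' (by omega) (by simpa using hk)

theorem ffirst_char (p : Int → Bool) : ∀ (a : List Int) (r : Nat),
    (∀ k, k < r → p (a.getD k 0) = false) →
    (r < a.length → p (a.getD r 0) = true) →
    r ≤ a.length → ffirst p a = r := by
  intro a
  induction a with
  | nil => intro r _ _ hr; simp at hr; simp [ffirst, hr]
  | cons x t ih =>
    intro r hlo hhi hr
    by_cases hx : p x = true
    · have hr0 : r = 0 := by
        by_contra h0
        have := hlo 0 (by omega)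
        simp at this
        simp [this] at hx
      simp [ffirst, hx, hr0]
    · have hx' : p x = false := by simpa using hx
      cases r with
      | zero =>
        have := hhi (by simp)
        simp at this
        simp [this] at hx'
      | succ r' =>
        have : ffirst p t = r' := by
          apply ih
          · intro k hk; have := hlo (k + 1) (by omega); simpa using this
          · intro h; have := hhi (by simpa using Nat.succ_lt_succ h); simpa using this
          · simpa using hr
        simp [ffirst, hx', this]

theorem firstTrueGo_spec (a : List Int) (p : Int → Bool)
    (hm : ∀ j k : Nat, j ≤ k → k < a.length → p (a.getD j 0) = true → p (a.getD k 0) = true) :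
    ∀ (fuel lo hi : Nat), lo ≤ hi → hi ≤ a.length → hi - lo ≤ fuel →
    (∀ k, k < lo → p (a.getD k 0) = false) →
    (∀ k, hi ≤ k → k < a.length → p (a.getD k 0) = true) →
    firstTrueGo a p lo hi fuel = ffirst p a := by
  intro fuel
  induction fuel with
  | zero =>
    intro lo hi hlh hha hf hlo hhi
    have : lo = hi := by omega
    subst this
    simp only [firstTrueGo]
    exact (ffirst_char p a lo hlo (fun h => hhi lo (le_refl _) h) (by omega)).symm
  | succ f ih =>
    intro lo hi hlh hha hf hlo hhi
    simp only [firstTrueGo]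
    by_cases hlt : lo < hi
    · simp only [hlt, if_true]
      by_cases hp : p (a.getD ((lo + hi) / 2) 0) = true
      · simp only [hp, if_true]
        exact ih lo ((lo + hi) / 2) (by omega) (by omega) (by omega) hlo
          (fun k hk hka => hm ((lo + hi) / 2) k hk hka hp)
      · have hp' : p (a.getD ((lo + hi) / 2) 0) = false := by rwa [Bool.not_eq_true] at hp
        simp only [hp', if_false, Bool.false_eq_true]
        apply ih ((lo + hi) / 2 + 1) hi (by omega) hha (by omega)
        · intro k hk
          by_cases hkl : k < lo
          · exact hlo k hkl
          · have hkm : k ≤ (lo + hi) / 2 := by omega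
            by_contra hc
            have hkt : p (a.getD k 0) = true := by
              cases h : p (a.getD k 0) with
              | false => exact absurd h hc
              | true => rfl
            have := hm k ((lo + hi) / 2) hkm (by omega) hkt
            rw [this] at hp'
            exact absurd hp' (by simp)
        · exact hhi
    · simp only [hlt, if_false]
      have : lo = hi := by omega
      subst this
      exact (ffirst_char p a lo hlo (fun h => hhi lo (le_refl _) h) (by omega)).symm

theorem firstTrue_eq_ffirst (a : List Int) (p : Int → Bool)
    (hm : ∀ j k : Nat, j ≤ k → k < a.length → p (a.getD j 0) = true → p (a.getD k 0) = true) :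
    firstTrue a p = ffirst p a := by
  apply firstTrueGo_spec a p hm a.length 0 a.length (by omega) (le_refl _) (by omega)
  · intro k hk; omega
  · intro k hk hka; omega

-- characterization of A's loop once run_start has been found
theorem loopA_some (s e : Int) (ts : List String) : ∀ (i pos k os : Int),
    findLoopA s e ts i pos (some (k, os)) =
      (let ends := endsOf pos ts
       let js := ffirst (fun v => decide (e ≤ v)) ends
       if js < ts.length then
         (some k, some (i + (js : Int)), some os,
          some (e - (ends.getD js 0 - PySem.Str.len (ts.getD js ""))))
       else (none, none, none, none)) := by
  induction ts with
  | nil => intro i pos k os; simp [findLoopA, endsOf, ffirst]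
  | cons t r ih =>
    intro i pos k os
    by_cases he : e ≤ pos + PySem.Str.len t
    · have hde : decide (e ≤ pos + PySem.Str.len t) = true := decide_eq_true he
      simp only [findLoopA, endsOf, ffirst, hde, if_pos he, if_true, List.length_cons]
      rw [if_pos (by omega : (0 : Nat) < r.length + 1)]
      simp only [List.getD_cons_zero, Nat.cast_zero, add_zero, add_sub_cancel_right]
    · have hde : decide (e ≤ pos + PySem.Str.len t) = false := decide_eq_false he
      simp only [findLoopA, endsOf, ffirst, hde, if_neg he, Bool.false_eq_true, if_false,
        List.length_cons]
      rw [ih (i + 1) (pos + PySem.Str.len t) k os]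
      simp only []
      set js' := ffirst (fun v => decide (e ≤ v)) (endsOf (pos + PySem.Str.len t) r) with hjsdef
      by_cases hjs : js' < r.length
      · rw [if_pos hjs, if_pos (by omega : js' + 1 < r.length + 1)]
        simp only [List.getD_cons_succ, Nat.cast_add, Nat.cast_one]
        have h1 : i + 1 + (js' : Int) = i + ((js' : Int) + 1) := by ring
        rw [h1]
      · rw [if_neg hjs, if_neg (by omega : ¬ js' + 1 < r.length + 1)]

-- characterization of A's loop from its initial state
theorem loopA_none (s e : Int) (ts : List String) : ∀ (i pos : Int),
    findLoopA s e ts i pos none =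
      (let ends := endsOf pos ts
       let is := ffirst (fun v => decide (s < v)) ends
       let js := ffirst (fun v => decide (e ≤ v)) ends
       if js < ts.length ∧ is ≤ js then
         (some (i + (is : Int)), some (i + (js : Int)),
          some (s - (ends.getD is 0 - PySem.Str.len (ts.getD is ""))),
          some (e - (ends.getD js 0 - PySem.Str.len (ts.getD js ""))))
       else (none, none, none, none)) := by
  induction ts with
  | nil => intro i pos; simp [findLoopA, endsOf, ffirst]
  | cons t r ih =>
    intro i pos
    by_cases hs : s < pos + PySem.Str.len t
    · have hds : decide (s < pos + PySem.Str.len t) = true := decide_eq_true hs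
      by_cases he : e ≤ pos + PySem.Str.len t
      · have hde : decide (e ≤ pos + PySem.Str.len t) = true := decide_eq_true he
        simp only [findLoopA, endsOf, ffirst, hds, hde, if_pos hs, if_pos he, if_true,
          List.length_cons]
        rw [if_pos (⟨by omega, le_refl 0⟩ : (0 : Nat) < r.length + 1 ∧ (0 : Nat) ≤ 0)]
        simp only [List.getD_cons_zero, Nat.cast_zero, add_zero, add_sub_cancel_right]
      · have hde : decide (e ≤ pos + PySem.Str.len t) = false := decide_eq_false he
        simp only [findLoopA, endsOf, ffirst, hds, hde, if_pos hs, if_neg he, if_true,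
          Bool.false_eq_true, if_false, List.length_cons]
        rw [loopA_some s e r (i + 1) (pos + PySem.Str.len t) i (s - pos)]
        simp only []
        set js' := ffirst (fun v => decide (e ≤ v)) (endsOf (pos + PySem.Str.len t) r) with hjsdef
        by_cases hjs : js' < r.length
        · rw [if_pos hjs,
            if_pos (⟨by omega, by omega⟩ : js' + 1 < r.length + 1 ∧ (0 : Nat) ≤ js' + 1)]
          simp only [List.getD_cons_zero, List.getD_cons_succ, Nat.cast_zero, Nat.cast_add,
            Nat.cast_one, add_zero, add_sub_cancel_right]
          have h1 : i + 1 + (js' : Int) = i + ((js' : Int) + 1) := by ring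
          rw [h1]
        · rw [if_neg hjs, if_neg (by omega : ¬ (js' + 1 < r.length + 1 ∧ (0 : Nat) ≤ js' + 1))]
    · have hds : decide (s < pos + PySem.Str.len t) = false := decide_eq_false hs
      by_cases he : e ≤ pos + PySem.Str.len t
      · have hde : decide (e ≤ pos + PySem.Str.len t) = true := decide_eq_true he
        simp only [findLoopA, endsOf, ffirst, hds, hde, if_neg hs, if_pos he, if_true,
          Bool.false_eq_true, if_false, List.length_cons]
        set is' := ffirst (fun v => decide (s < v)) (endsOf (pos + PySem.Str.len t) r) with hisdef
        rw [if_neg (by omega : ¬ ((0 : Nat) < r.length + 1 ∧ is' + 1 ≤ 0))]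
      · have hde : decide (e ≤ pos + PySem.Str.len t) = false := decide_eq_false he
        simp only [findLoopA, endsOf, ffirst, hds, hde, if_neg hs, if_neg he,
          Bool.false_eq_true, if_false, List.length_cons]
        rw [ih (i + 1) (pos + PySem.Str.len t)]
        simp only []
        set is' := ffirst (fun v => decide (s < v)) (endsOf (pos + PySem.Str.len t) r) with hisdef
        set js' := ffirst (fun v => decide (e ≤ v)) (endsOf (pos + PySem.Str.len t) r) with hjsdef
        by_cases hc : js' < r.length ∧ is' ≤ js'
        · rw [if_pos hc, if_pos (by omega : js' + 1 < r.length + 1 ∧ is' + 1 ≤ js' + 1)]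
          simp only [List.getD_cons_succ, Nat.cast_add, Nat.cast_one]
          have h1 : i + 1 + (is' : Int) = i + ((is' : Int) + 1) := by ring
          have h2 : i + 1 + (js' : Int) = i + ((js' : Int) + 1) := by ring
          rw [h1, h2]
        · rw [if_neg hc, if_neg (by omega : ¬ (js' + 1 < r.length + 1 ∧ is' + 1 ≤ js' + 1))]

-- ===== VERDICT (by name: the statement is the Claim_ definition above) =====
theorem find_run_indices_py_spec : Claim_equal_find_run_indices_py := by
  intro ts s e _
  unfold Spec_find_run_indices_py find_run_indices_py find_run_indices_py_alt
  have hends : (ts.foldl (fun (a : Int × List Int) text => (a.1 + PySem.Str.len text, a.2 ++ [a.1 + PySem.Str.len text])) (0, [])).2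
      = endsOf 0 ts := by simpa using foldl_ends ts 0 []
  rw [loopA_none s e ts 0 0]
  simp only [hends, length_endsOf]
  have hms : ∀ j k : Nat, j ≤ k → k < (endsOf 0 ts).length →
      (fun v => decide (s < v)) ((endsOf 0 ts).getD j 0) = true →
      (fun v => decide (s < v)) ((endsOf 0 ts).getD k 0) = true := by
    intro j k hjk hk h
    simp only [decide_eq_true_eq] at h ⊢
    have := endsOf_mono ts 0 j k hjk (by simpa [length_endsOf] using hk)
    omega
  have hme : ∀ j k : Nat, j ≤ k → k < (endsOf 0 ts).length →
      (fun v => decide (e ≤ v)) ((endsOf 0 ts).getD j 0) = true →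
      (fun v => decide (e ≤ v)) ((endsOf 0 ts).getD k 0) = true := by
    intro j k hjk hk h
    simp only [decide_eq_true_eq] at h ⊢
    have := endsOf_mono ts 0 j k hjk (by simpa [length_endsOf] using hk)
    omega
  rw [firstTrue_eq_ffirst (endsOf 0 ts) (fun v => decide (s < v)) hms,
    firstTrue_eq_ffirst (endsOf 0 ts) (fun v => decide (e ≤ v)) hme]
  simp
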